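-- pv_equiv track=rewrite | github.com/prsnt558908/CodeZymSolutions | q53-mex-array/solution-2-python/Solution.py | getMaxArray
-- ===== SOURCE A (Python) =====
-- import heapq
-- from typing import List
--
-- def getMaxArray(data_packets: List[int]) -> List[int]:
--     """
--     Greedy:
--     - Let S be the remaining suffix.
--     - The first output should be mex(S) (can't do better with any prefix).
--     - If mex(S)=m>0: take the smallest prefix that contains all 0..m-1 at least once.
--     - If mex(S)=0: every prefix has mex 0, so take k=1 repeatedly to maximize length.
--     """
--     n = len(data_packets)
--     a = data_packets
--
--     max_val = n + 1  # mex is never > n, tracking up to n+1 is safe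
--
--     # freq only for values in [0..max_val]; ignore bigger values (they can't affect mex)
--     freq = [0] * (max_val + 1)
--     for x in a:
--         if 0 <= x <= max_val:
--             freq[x] += 1
--
--     # Min-heap of missing numbers in [0..max_val]
--     # We'll lazily discard values that aren't missing anymore.
--     missing = []
--     for v in range(max_val + 1):
--         if freq[v] == 0:
--             heapq.heappush(missing, v)
--
--     def current_mex() -> int:
--         while missing and freq[missing[0]] != 0:
--             heapq.heappop(missing)
--         return missing[0]  # always exists because we track up to n+1
--
--     res: List[int] = []
--     seen_at = [0] * (max_val + 1)  # timestamp trick for segment-local seen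
--     seg_id = 0
--
--     i = 0
--     while i < n:
--         mex = current_mex()
--
--         if mex == 0:
--             # 0 absent in suffix => every prefix mex is 0, maximize length => k=1 repeatedly
--             while i < n:
--                 res.append(0)
--                 x = a[i]
--                 if 0 <= x <= max_val:
--                     freq[x] -= 1
--                     if freq[x] == 0:
--                         heapq.heappush(missing, x)
--                 i += 1
--             break
--
--         # Build smallest prefix starting at i that contains all numbers 0..mex-1
--         seg_id += 1
--         need = mex
--         j = i
--         while need > 0:
--             v = a[j]
--             if 0 <= v < mex and seen_at[v] != seg_id:
--                 seen_at[v] = seg_id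
--                 need -= 1
--             j += 1
--
--         res.append(mex)
--
--         # Remove [i..j-1] from suffix
--         while i < j:
--             x = a[i]
--             if 0 <= x <= max_val:
--                 freq[x] -= 1
--                 if freq[x] == 0:
--                     heapq.heappush(missing, x)
--             i += 1
--
--     return res
-- ===== SOURCE B (Python) =====
-- from typing import List
--
-- def getMaxArray(data_packets: List[int]) -> List[int]:
--     # Same greedy, but recompute everything per segment: no freq array, no heap,
--     # no timestamps -- mex by scanning the remaining suffix, segment split via a set.
--     res: List[int] = []
--     rest = data_packets
--     while rest:
--         mex = 0
--         while mex in rest: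
--             mex += 1
--         if mex == 0:
--             res.extend([0] * len(rest))
--             break
--         seen = set()
--         k = 0
--         while len(seen) < mex:
--             v = rest[k]
--             if 0 <= v < mex:
--                 seen.add(v)
--             k += 1
--         res.append(mex)
--         rest = rest[k:]
--     return res
-- ===== Notes on version B (the rewrite author's own statement) =====
-- stated objective: simpler
-- what changed: Replaced A's incrementally-maintained freq array, lazy min-heap of missing values and timestamped seen_at array with direct per-segment recomputation: the mex is found by scanning the remaining suffix and the smallest covering prefix by filling a plain set.
import Mathlib
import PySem

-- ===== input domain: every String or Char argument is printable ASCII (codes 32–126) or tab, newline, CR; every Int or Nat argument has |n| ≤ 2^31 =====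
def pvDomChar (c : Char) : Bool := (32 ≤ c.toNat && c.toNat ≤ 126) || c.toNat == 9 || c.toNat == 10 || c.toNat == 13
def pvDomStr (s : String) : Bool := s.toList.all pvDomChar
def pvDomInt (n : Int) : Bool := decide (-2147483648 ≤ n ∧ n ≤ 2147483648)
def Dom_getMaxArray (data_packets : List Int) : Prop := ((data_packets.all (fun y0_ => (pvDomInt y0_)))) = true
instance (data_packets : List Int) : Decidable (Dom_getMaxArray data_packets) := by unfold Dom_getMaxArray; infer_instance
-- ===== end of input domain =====

-- B replaces A's incrementally maintained freq array + lazy min-heap + timestamp array by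
-- direct per-segment recomputation (mex by scanning the suffix, segment split via a plain set);
-- objective: simpler (not faster).

-- ===== PORT A =====
-- heapq.heappush on a heap that is only ever read at its minimum: modelled as ordered insert
-- (observationally exact: heapq exposes the minimum at index 0 and heappop removes it).
def pvHeapPush (h : List Int) (v : Int) : List Int :=
  match h with
  | [] => [v]
  | x :: t => if v ≤ x then v :: x :: t else x :: pvHeapPush t v

-- `current_mex`: pop stale entries, then return missing[0]; returns the popped heap too
-- (the Python closure mutates `missing`).  `([], 0)` is the IndexError guard, never reached.
def pvCurMex (f : Int → Int) : List Int → List Int × Int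
  | [] => ([], 0)
  | v :: t => if f v ≠ 0 then pvCurMex f t else (v :: t, v)

-- the freq list, kept as a function (only indices 0..max_val are ever touched)
def pvFreqInit (maxv : Int) (a : List Int) : Int → Int :=
  a.foldl (fun f x => if 0 ≤ x ∧ x ≤ maxv then (fun u => if u = x then f x + 1 else f u) else f)
    (fun _ => 0)

-- `for v in range(max_val+1): if freq[v]==0: heappush(missing, v)`
def pvMissInit (maxv : Nat) (f : Int → Int) : List Int :=
  (List.range (maxv + 1)).foldl (fun (h : List Int) (v : Nat) => if f (v : Int) = 0 then pvHeapPush h (v : Int) else h) []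

-- the removal body (`freq[x] -= 1; if freq[x]==0: heappush(...)`), shared by both removal loops
def pvDrop1 (maxv : Int) (fh : (Int → Int) × List Int) (x : Int) : (Int → Int) × List Int :=
  if 0 ≤ x ∧ x ≤ maxv then
    let f' : Int → Int := fun u => if u = x then fh.1 x - 1 else fh.1 u
    if f' x = 0 then (f', pvHeapPush fh.2 x) else (f', fh.2)
  else fh

-- the mex == 0 branch: append a 0 per remaining element while removing it from the state
def pvZeroRun (maxv : Int) (fh : (Int → Int) × List Int) : List Int → List Int × ((Int → Int) × List Int)
  | [] => ([], fh)
  | x :: t =>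
    let r := pvZeroRun maxv (pvDrop1 maxv fh x) t
    (0 :: r.1, r.2)

-- the `while need > 0` loop: returns (seen_at', consumed prefix a[i..j-1], rest a[j:])
def pvTakeSeg (mex : Int) (seg : Nat) (seen : Int → Nat) (need : Nat) (l : List Int) :
    (Int → Nat) × List Int × List Int :=
  if need = 0 then (seen, [], l)
    else
      match l with
      | [] => (seen, [], [])  -- IndexError guard, never reached
      | v :: t =>
        if 0 ≤ v ∧ v < mex ∧ seen v ≠ seg then
          let r := pvTakeSeg mex seg (fun u => if u = v then seg else seen u) (need - 1) t
          (r.1, v :: r.2.1, r.2.2)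
        else
          let r := pvTakeSeg mex seg seen need t
          (r.1, v :: r.2.1, r.2.2)

-- the outer `while i < n` loop; fuel only makes the recursion total (enough fuel is never exhausted)
def pvOuter (maxv : Int) : Nat → (Int → Int) → List Int → (Int → Nat) → Nat → List Int → List Int
  | 0, _, _, _, _, _ => []
  | _, _, _, _, _, [] => []
  | fuel + 1, f, h, seen, seg, s =>
    let hm := pvCurMex f h
    if hm.2 = 0 then (pvZeroRun maxv (f, hm.1) s).1
    else
      let t := pvTakeSeg (hm.2) (seg + 1) seen (hm.2).toNat s
      let fh := t.2.1.foldl (pvDrop1 maxv) (f, hm.1)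
      hm.2 :: pvOuter maxv fuel fh.1 fh.2 t.1 (seg + 1) t.2.2

def getMaxArray (data_packets : List Int) : List Int :=
  let n := data_packets.length
  let maxv : Int := (n : Int) + 1
  let f := pvFreqInit maxv data_packets
  let h := pvMissInit (n + 1) f
  pvOuter maxv n f h (fun _ => 0) 0 data_packets

-- ===== PORT B =====
-- `mex = 0; while mex in rest: mex += 1` (fuel = len(rest)+1 always suffices)
def pvMexFrom (s : List Int) : Int → Nat → Int
  | m, 0 => m
  | m, fuel + 1 => if m ∈ s then pvMexFrom s (m + 1) fuel else m

-- `while len(seen) < mex: v = rest[k]; if 0 <= v < mex: seen.add(v); k += 1` and `rest = rest[k:]`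
def pvSegRest (mex : Int) (seen : PySem.Set Int) (l : List Int) : List Int :=
  if PySem.Set.len seen < mex then
      match l with
      | [] => []  -- IndexError guard, never reached
      | v :: t => pvSegRest mex (if 0 ≤ v ∧ v < mex then PySem.Set.add seen v else seen) t
    else l

-- the `while rest` loop; fuel only makes the recursion total (enough fuel is never exhausted)
def pvGo : Nat → List Int → List Int
  | 0, _ => []
  | _, [] => []
  | fuel + 1, s =>
    let mex := pvMexFrom s 0 (s.length + 1)
    if mex = 0 then List.replicate s.length 0
    else mex :: pvGo fuel (pvSegRest mex PySem.Set.empty s)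

def getMaxArray_alt (data_packets : List Int) : List Int :=
  pvGo data_packets.length data_packets

-- ===== PRECONDITION & SPEC =====
def Spec_getMaxArray (data_packets : List Int) (out : List Int) : Prop := out = getMaxArray_alt data_packets
instance (data_packets : List Int) (out : List Int) : Decidable (Spec_getMaxArray data_packets out) := by unfold Spec_getMaxArray; infer_instance

-- ===== CLAIM (what is proved, stated in full; the proofs are below) =====
def Claim_equal_getMaxArray : Prop := ∀ (data_packets : List Int), Dom_getMaxArray data_packets → Spec_getMaxArray data_packets (getMaxArray data_packets)

-- ===== LEMMAS AND PROOFS =====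

-- `m` is the mex of `s`
def pvIsMex (s : List Int) (m : Int) : Prop :=
  0 ≤ m ∧ m ∉ s ∧ ∀ k : Int, 0 ≤ k → k < m → k ∈ s

lemma pvIsMex_unique {s : List Int} {m₁ m₂ : Int} (h₁ : pvIsMex s m₁) (h₂ : pvIsMex s m₂) :
    m₁ = m₂ := by
  obtain ⟨hn₁, hm₁, hl₁⟩ := h₁
  obtain ⟨hn₂, hm₂, hl₂⟩ := h₂
  rcases lt_trichotomy m₁ m₂ with h | h | h
  · exact absurd (hl₂ m₁ hn₁ h) hm₁
  · exact h
  · exact absurd (hl₁ m₂ hn₂ h) hm₂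

-- pigeonhole: some value in [0, len] is missing from s
lemma pv_exists_nonmem (s : List Int) : ∃ j : Int, 0 ≤ j ∧ j ≤ (s.length : Int) ∧ j ∉ s := by
  by_contra hc
  push_neg at hc
  have hsub : Finset.Icc (0 : Int) (s.length : Int) ⊆ s.toFinset := by
    intro j hj
    rw [Finset.mem_Icc] at hj
    simpa using hc j hj.1 hj.2
  have hcard := Finset.card_le_card hsub
  rw [Int.card_Icc] at hcard
  have hle := s.toFinset_card_le
  omega

lemma mem_pvHeapPush (h : List Int) (x v : Int) : v ∈ pvHeapPush h x ↔ v = x ∨ v ∈ h := by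
  induction h with
  | nil => simp [pvHeapPush]
  | cons y t ih =>
    simp only [pvHeapPush]
    split
    · simp [or_comm, or_assoc]
    · simp [ih]; tauto

lemma sorted_pvHeapPush (h : List Int) (x : Int) (hs : h.Pairwise (· ≤ ·)) :
    (pvHeapPush h x).Pairwise (· ≤ ·) := by
  induction h with
  | nil => simp [pvHeapPush]
  | cons y t ih =>
    rw [List.pairwise_cons] at hs
    simp only [pvHeapPush]
    split
    · rename_i hxy
      rw [List.pairwise_cons]
      refine ⟨?_, by rw [List.pairwise_cons]; exact hs⟩
      intro b hb
      rcases List.mem_cons.mp hb with rfl | hb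
      · exact hxy
      · exact le_trans hxy (hs.1 b hb)
    · rename_i hxy
      rw [List.pairwise_cons]
      refine ⟨?_, ih hs.2⟩
      intro b hb
      rcases (mem_pvHeapPush t x b).mp hb with rfl | hb
      · omega
      · exact hs.1 b hb

lemma pvCurMex_spec (f : Int → Int) (h : List Int) (hs : h.Pairwise (· ≤ ·))
    (hw : ∃ w ∈ h, f w = 0) :
    (pvCurMex f h).2 ∈ h ∧ f (pvCurMex f h).2 = 0 ∧
    (∀ k ∈ h, f k = 0 → (pvCurMex f h).2 ≤ k) ∧
    (pvCurMex f h).1.Pairwise (· ≤ ·) ∧ (pvCurMex f h).1 ⊆ h ∧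
    (∀ k ∈ h, f k = 0 → k ∈ (pvCurMex f h).1) := by
  induction h with
  | nil => obtain ⟨w, hw, _⟩ := hw; simp at hw
  | cons x t ih =>
    rw [List.pairwise_cons] at hs
    by_cases hfx : f x = 0
    · have : pvCurMex f (x :: t) = (x :: t, x) := by simp [pvCurMex, hfx]
      rw [this]
      refine ⟨by simp, hfx, ?_, by rw [List.pairwise_cons]; exact hs, fun a ha => ha, fun k hk _ => hk⟩
      intro k hk _
      rcases List.mem_cons.mp hk with rfl | hk
      · exact le_refl _
      · exact hs.1 k hk
    · have heq : pvCurMex f (x :: t) = pvCurMex f t := by simp [pvCurMex, hfx]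
      obtain ⟨w, hwm, hwf⟩ := hw
      have hwt : w ∈ t := by
        rcases List.mem_cons.mp hwm with rfl | hw'
        · exact absurd hwf hfx
        · exact hw'
      obtain ⟨h1, h2, h3, h4, h5, h6⟩ := ih hs.2 ⟨w, hwt, hwf⟩
      rw [heq]
      refine ⟨List.mem_cons_of_mem _ h1, h2, ?_, h4, fun a ha => List.mem_cons_of_mem _ (h5 ha), ?_⟩
      · intro k hk hfk
        rcases List.mem_cons.mp hk with rfl | hk
        · exact absurd hfk hfx
        · exact h3 k hk hfk
      · intro k hk hfk
        rcases List.mem_cons.mp hk with rfl | hk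
        · exact absurd hfk hfx
        · exact h6 k hk hfk

lemma pvMexFrom_spec (s : List Int) :
    ∀ (fuel : Nat) (m : Int), 0 ≤ m → (∀ k : Int, 0 ≤ k → k < m → k ∈ s) →
    (∃ j : Int, m ≤ j ∧ j < m + fuel ∧ j ∉ s) →
    pvIsMex s (pvMexFrom s m fuel) := by
  intro fuel
  induction fuel with
  | zero =>
    intro m _ _ hj
    obtain ⟨j, h1, h2, _⟩ := hj
    omega
  | succ fuel ih =>
    intro m hm hlow hj
    simp only [pvMexFrom]
    split
    · rename_i hmem
      apply ih (m + 1) (by omega)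
      · intro k hk hk1
        by_cases hkm : k = m
        · subst hkm; exact hmem
        · exact hlow k hk (by omega)
      · obtain ⟨j, h1, h2, h3⟩ := hj
        refine ⟨j, ?_, by push_cast; push_cast at h2; omega, h3⟩
        rcases eq_or_lt_of_le h1 with rfl | h
        · exact absurd hmem h3
        · omega
    · exact ⟨hm, by assumption, hlow⟩

lemma pvZeroRun_fst (maxv : Int) : ∀ (s : List Int) (fh : (Int → Int) × List Int),
    (pvZeroRun maxv fh s).1 = List.replicate s.length 0 := by
  intro s
  induction s with
  | nil => intro fh; simp [pvZeroRun]
  | cons x t ih => intro fh; simp [pvZeroRun, ih, List.replicate_succ]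

lemma pvTakeSeg_cons_ne_nil (mex : Int) (seg : Nat) (seen : Int → Nat) (need : Nat)
    (v : Int) (t : List Int) (hne : need ≠ 0) :
    (pvTakeSeg mex seg seen need (v :: t)).2.1 ≠ [] := by
  simp only [pvTakeSeg, hne, if_false]
  split <;> simp

-- the prefix-building loops of A and B walk the suffix in lockstep
lemma pvSeg_cong (mex : Int) (seg : Nat) :
    ∀ (l : List Int) (seen : Int → Nat) (sset : PySem.Set Int) (need : Nat),
    (∀ v : Int, (seen v = seg ∧ 0 ≤ v ∧ v < mex) ↔ v ∈ sset) →
    ((sset.length : Int) + need = mex) →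
    sset.Nodup →
    (pvTakeSeg mex seg seen need l).2.2 = pvSegRest mex sset l ∧
    (pvTakeSeg mex seg seen need l).2.1 ++ (pvTakeSeg mex seg seen need l).2.2 = l ∧
    (∀ v, (pvTakeSeg mex seg seen need l).1 v = seen v ∨ (pvTakeSeg mex seg seen need l).1 v = seg) := by
  intro l
  induction l with
  | nil =>
    intro seen sset need hiff hlen hnd
    by_cases hneed : need = 0
    · rw [pvTakeSeg.eq_def, if_pos hneed, pvSegRest.eq_def,
        if_neg (show ¬ PySem.Set.len sset < mex by simp [PySem.Set.len]; omega)]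
      exact ⟨rfl, rfl, fun v => Or.inl rfl⟩
    · rw [pvTakeSeg.eq_def, if_neg hneed, pvSegRest.eq_def,
        if_pos (show PySem.Set.len sset < mex by simp [PySem.Set.len]; omega)]
      exact ⟨rfl, rfl, fun v => Or.inl rfl⟩
  | cons v t ih =>
    intro seen sset need hiff hlen hnd
    by_cases hneed : need = 0
    · rw [pvTakeSeg.eq_def, if_pos hneed, pvSegRest.eq_def,
        if_neg (show ¬ PySem.Set.len sset < mex by simp [PySem.Set.len]; omega)]
      exact ⟨rfl, rfl, fun v => Or.inl rfl⟩
    · have hlt : PySem.Set.len sset < mex := by simp [PySem.Set.len]; omega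
      rw [pvTakeSeg.eq_def, if_neg hneed, pvSegRest.eq_def, if_pos hlt]
      simp only []
      by_cases hvr : 0 ≤ v ∧ v < mex
      · by_cases hvm : v ∈ sset
        · -- already seen: A skips, B's add is a no-op
          have hsv : seen v = seg := ((hiff v).mpr hvm).1
          have hcondA : ¬ (0 ≤ v ∧ v < mex ∧ seen v ≠ seg) := by
            intro hc; exact hc.2.2 hsv
          rw [if_neg hcondA]
          have haddeq : (if 0 ≤ v ∧ v < mex then PySem.Set.add sset v else sset) = sset := by
            rw [if_pos hvr]
            simp [PySem.Set.add, PySem.Set.contains, hvm]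
          rw [haddeq]
          obtain ⟨i1, i2, i3⟩ := ih seen sset need hiff hlen hnd
          exact ⟨i1, by simp [i2], i3⟩
        · -- new value: A marks it and decrements need, B adds it
          have hsv : seen v ≠ seg := by
            intro hsv
            exact hvm ((hiff v).mp ⟨hsv, hvr.1, hvr.2⟩)
          rw [if_pos ⟨hvr.1, hvr.2, hsv⟩]
          have haddeq : (if 0 ≤ v ∧ v < mex then PySem.Set.add sset v else sset) = sset ++ [v] := by
            rw [if_pos hvr]
            simp [PySem.Set.add, PySem.Set.contains, hvm]
          rw [haddeq]
          have hiff' : ∀ u : Int,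
              ((fun u => if u = v then seg else seen u) u = seg ∧ 0 ≤ u ∧ u < mex) ↔ u ∈ sset ++ [v] := by
            intro u
            by_cases huv : u = v
            · subst huv; simp [hvr.1, hvr.2]
            · simp only [if_neg huv, List.mem_append, List.mem_singleton, huv, or_false]
              exact hiff u
          have hlen' : (((sset ++ [v]).length : Int)) + (need - 1 : Nat) = mex := by
            simp only [List.length_append, List.length_singleton]
            push_cast [Nat.cast_sub (Nat.one_le_iff_ne_zero.mpr hneed)]
            omega
          have hnd' : (sset ++ [v]).Nodup :=
            List.Nodup.append hnd (List.nodup_singleton v) (by simpa using hvm)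
          obtain ⟨i1, i2, i3⟩ := ih _ (sset ++ [v]) (need - 1) hiff' hlen' hnd'
          refine ⟨i1, by simp [i2], ?_⟩
          intro u
          rcases i3 u with hu | hu
          · rw [hu]
            by_cases huv : u = v
            · subst huv; simp
            · simp [huv]
          · exact Or.inr hu
      · -- out of range: both skip
        have hcondA : ¬ (0 ≤ v ∧ v < mex ∧ seen v ≠ seg) := by
          intro hc; exact hvr ⟨hc.1, hc.2.1⟩
        rw [if_neg hcondA, if_neg hvr]
        obtain ⟨i1, i2, i3⟩ := ih seen sset need hiff hlen hnd
        exact ⟨i1, by simp [i2], i3⟩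

-- removing a prefix from the suffix keeps the freq/heap invariants
lemma pvDropFold (maxv : Int) :
    ∀ (p : List Int) (r : List Int) (f : Int → Int) (h : List Int),
    (∀ v : Int, 0 ≤ v → v ≤ maxv → f v = ((p ++ r).count v : Int)) →
    h.Pairwise (· ≤ ·) → (∀ v ∈ h, 0 ≤ v ∧ v ≤ maxv) →
    (∀ v : Int, 0 ≤ v → v ≤ maxv → f v = 0 → v ∈ h) →
    (∀ v : Int, 0 ≤ v → v ≤ maxv → (p.foldl (pvDrop1 maxv) (f, h)).1 v = (r.count v : Int)) ∧
    (p.foldl (pvDrop1 maxv) (f, h)).2.Pairwise (· ≤ ·) ∧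
    (∀ v ∈ (p.foldl (pvDrop1 maxv) (f, h)).2, 0 ≤ v ∧ v ≤ maxv) ∧
    (∀ v : Int, 0 ≤ v → v ≤ maxv → (p.foldl (pvDrop1 maxv) (f, h)).1 v = 0 →
      v ∈ (p.foldl (pvDrop1 maxv) (f, h)).2) := by
  intro p
  induction p with
  | nil => intro r f h hf hs hr hz; exact ⟨by simpa using hf, hs, hr, hz⟩
  | cons x p' ih =>
    intro r f h hf hs hr hz
    rw [List.foldl_cons]
    have hcx : ((x :: p') ++ r).count x = ((p' ++ r).count x) + 1 := by
      simp [List.count_cons]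
    by_cases hx : 0 ≤ x ∧ x ≤ maxv
    · have hstep : pvDrop1 maxv (f, h) x =
        (fun u => if u = x then f x - 1 else f u,
          if f x - 1 = 0 then pvHeapPush h x else h) := by
        simp only [pvDrop1, if_pos hx]
        by_cases hzz : f x - 1 = 0 <;> simp [hzz]
      rw [hstep]
      have hf' : ∀ v : Int, 0 ≤ v → v ≤ maxv →
          (fun u => if u = x then f x - 1 else f u) v = ((p' ++ r).count v : Int) := by
        intro v h0 h1
        by_cases hvx : v = x
        · subst hvx
          simp only [if_pos rfl]
          rw [hf v h0 h1, hcx]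
          push_cast; ring
        · simp only [if_neg hvx]
          rw [hf v h0 h1]
          congr 1
          simp [List.count_cons, Ne.symm hvx]
      by_cases hz0 : f x - 1 = 0
      · rw [if_pos hz0]
        apply ih r _ _ hf' (sorted_pvHeapPush _ _ hs)
        · intro v hv
          rcases (mem_pvHeapPush _ _ _).mp hv with rfl | hv
          · exact hx
          · exact hr v hv
        · intro v h0 h1 hv0
          rw [mem_pvHeapPush]
          by_cases hvx : v = x
          · exact Or.inl hvx
          · simp only [if_neg hvx] at hv0
            exact Or.inr (hz v h0 h1 hv0)
      · rw [if_neg hz0]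
        apply ih r _ _ hf' hs hr
        intro v h0 h1 hv0
        by_cases hvx : v = x
        · subst hvx; simp only [if_pos rfl] at hv0; exact absurd hv0 hz0
        · simp only [if_neg hvx] at hv0
          exact hz v h0 h1 hv0
    · have hstep : pvDrop1 maxv (f, h) x = (f, h) := by simp only [pvDrop1, if_neg hx]
      rw [hstep]
      apply ih r f h _ hs hr hz
      intro v h0 h1
      rw [hf v h0 h1]
      congr 1
      have : v ≠ x := by intro hvx; subst hvx; exact hx ⟨h0, h1⟩
      simp [List.count_cons, Ne.symm this]

lemma pvFreqInit_aux (maxv : Int) :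
    ∀ (a : List Int) (f0 : Int → Int) (v : Int), 0 ≤ v → v ≤ maxv →
    (a.foldl (fun f x => if 0 ≤ x ∧ x ≤ maxv then (fun u => if u = x then f x + 1 else f u) else f) f0) v
      = f0 v + (a.count v : Int) := by
  intro a
  induction a with
  | nil => intro f0 v _ _; simp
  | cons x t ih =>
    intro f0 v h0 h1
    rw [List.foldl_cons, ih _ v h0 h1, List.count_cons]
    by_cases hvx : v = x
    · subst hvx
      simp only [if_pos (And.intro h0 h1), if_pos rfl, beq_self_eq_true, if_pos]
      push_cast
      ring
    · have : (x == v) = false := by simp [Ne.symm hvx]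
      split
      · simp [hvx, this]
      · simp [this]

-- initial freq is the count (on [0, maxv])
lemma pvFreqInit_spec (maxv : Int) (a : List Int) :
    ∀ v : Int, 0 ≤ v → v ≤ maxv → pvFreqInit maxv a v = (a.count v : Int) := by
  intro v h0 h1
  unfold pvFreqInit
  rw [pvFreqInit_aux maxv a _ v h0 h1]
  ring

lemma pvMissInit_aux (f : Int → Int) :
    ∀ n : Nat,
    ((List.range n).foldl (fun (h : List Int) (v : Nat) => if f (v : Int) = 0 then pvHeapPush h (v : Int) else h) []).Pairwise (· ≤ ·) ∧
    (∀ v ∈ (List.range n).foldl (fun (h : List Int) (v : Nat) => if f (v : Int) = 0 then pvHeapPush h (v : Int) else h) [],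
      0 ≤ v ∧ v < (n : Int)) ∧
    (∀ k : Nat, k < n → f (k : Int) = 0 →
      (k : Int) ∈ (List.range n).foldl (fun (h : List Int) (v : Nat) => if f (v : Int) = 0 then pvHeapPush h (v : Int) else h) []) := by
  intro n
  induction n with
  | zero => simp
  | succ n ih =>
    obtain ⟨ihs, ihr, ihc⟩ := ih
    rw [List.range_succ, List.foldl_append, List.foldl_cons, List.foldl_nil]
    by_cases hfn : f (n : Int) = 0
    · rw [if_pos hfn]
      refine ⟨sorted_pvHeapPush _ _ ihs, ?_, ?_⟩
      · intro v hv
        rcases (mem_pvHeapPush _ _ _).mp hv with rfl | hv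
        · constructor <;> push_cast <;> omega
        · have := ihr v hv; push_cast at this ⊢; omega
      · intro k hk hfk
        rw [mem_pvHeapPush]
        by_cases hkn : k = n
        · subst hkn; exact Or.inl rfl
        · exact Or.inr (ihc k (by omega) hfk)
    · rw [if_neg hfn]
      refine ⟨ihs, ?_, ?_⟩
      · intro v hv; have := ihr v hv; push_cast at this ⊢; omega
      · intro k hk hfk
        by_cases hkn : k = n
        · subst hkn; exact absurd hfk hfn
        · exact ihc k (by omega) hfk

-- initial heap: sorted, in range, and contains every zero-count value
lemma pvMissInit_spec (maxv : Nat) (f : Int → Int) :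
    (pvMissInit maxv f).Pairwise (· ≤ ·) ∧
    (∀ v ∈ pvMissInit maxv f, 0 ≤ v ∧ v ≤ (maxv : Int)) ∧
    (∀ v : Int, 0 ≤ v → v ≤ (maxv : Int) → f v = 0 → v ∈ pvMissInit maxv f) := by
  obtain ⟨hs, hr, hc⟩ := pvMissInit_aux f (maxv + 1)
  refine ⟨hs, ?_, ?_⟩
  · intro v hv; have := hr v hv; push_cast at this ⊢; omega
  · intro v h0 h1 hf0
    have hv : v = ((v.toNat : Nat) : Int) := by omega
    rw [hv]
    exact hc v.toNat (by omega) (by rw [← hv]; exact hf0)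

-- the main loop invariant: A's outer loop equals B's outer loop
lemma pvOuter_eq_pvGo (maxv : Int) :
    ∀ (fuel : Nat) (s : List Int) (f : Int → Int) (h : List Int) (seen : Int → Nat) (seg : Nat),
    s.length ≤ fuel →
    (s.length : Int) < maxv →
    (∀ v : Int, 0 ≤ v → v ≤ maxv → f v = (s.count v : Int)) →
    h.Pairwise (· ≤ ·) →
    (∀ v ∈ h, 0 ≤ v ∧ v ≤ maxv) →
    (∀ v : Int, 0 ≤ v → v ≤ maxv → f v = 0 → v ∈ h) →
    (∀ v, seen v ≤ seg) →
    pvOuter maxv fuel f h seen seg s = pvGo fuel s := by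
  intro fuel
  induction fuel with
  | zero =>
    intro s f h seen seg hfuel _ _ _ _ _ _
    rw [List.length_eq_zero_iff.mp (Nat.le_zero.mp hfuel)]
    rfl
  | succ fuel ih =>
    intro s f h seen seg hfuel hlen hf hs hr hz hseen
    match s with
    | [] => rfl
    | x :: t =>
      -- the two mex computations agree
      obtain ⟨j, hj0, hjle, hjnm⟩ := pv_exists_nonmem (x :: t)
      have hfj : f j = 0 := by
        rw [hf j hj0 (by omega), List.count_eq_zero.mpr hjnm]
        rfl
      have hw : ∃ w ∈ h, f w = 0 := ⟨j, hz j hj0 (by omega) hfj, hfj⟩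
      obtain ⟨hm_mem, hm_f0, hm_min, hm_sort, hm_sub, hm_keep⟩ := pvCurMex_spec f h hs hw
      have hmr := hr _ hm_mem
      have hmA : pvIsMex (x :: t) (pvCurMex f h).2 := by
        refine ⟨hmr.1, ?_, ?_⟩
        · intro hmem
          have := hf _ hmr.1 hmr.2
          rw [hm_f0] at this
          have := List.count_eq_zero.mp (by exact_mod_cast this.symm)
          exact this hmem
        · intro k hk0 hkm
          by_contra hknm
          have hfk : f k = 0 := by
            rw [hf k hk0 (by omega), List.count_eq_zero.mpr hknm]; rfl
          have := hm_min k (hz k hk0 (by omega) hfk) hfk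
          omega
      have hmB : pvIsMex (x :: t) (pvMexFrom (x :: t) 0 ((x :: t).length + 1)) := by
        apply pvMexFrom_spec
        · exact le_refl 0
        · intro k hk0 hk; omega
        · exact ⟨j, hj0, by push_cast; omega, hjnm⟩
      have hmm : pvMexFrom (x :: t) 0 ((x :: t).length + 1) = (pvCurMex f h).2 :=
        pvIsMex_unique hmB hmA
      rw [pvOuter.eq_def, pvGo.eq_def]
      simp only [hmm]
      by_cases hm0 : (pvCurMex f h).2 = 0
      · rw [if_pos hm0, if_pos hm0, pvZeroRun_fst]
      · rw [if_neg hm0, if_neg hm0]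
        have hmpos : 0 < (pvCurMex f h).2 := lt_of_le_of_ne hmr.1 (Ne.symm hm0)
        -- the two segment walks agree
        have hsc := pvSeg_cong (pvCurMex f h).2 (seg + 1) (x :: t) seen PySem.Set.empty
          ((pvCurMex f h).2).toNat
          (by
            intro v
            constructor
            · rintro ⟨hv, -⟩
              have := hseen v
              omega
            · intro hv
              simp [PySem.Set.empty] at hv)
          (by simp [PySem.Set.empty]; omega)
          (by simp [PySem.Set.empty])
        obtain ⟨hrest, happ, hseen'⟩ := hsc
        have hpne := pvTakeSeg_cons_ne_nil (pvCurMex f h).2 (seg + 1) seen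
          ((pvCurMex f h).2).toNat x t (by omega)
        have hrlen : (pvTakeSeg (pvCurMex f h).2 (seg + 1) seen ((pvCurMex f h).2).toNat (x :: t)).2.2.length
            < (x :: t).length := by
          have := congrArg List.length happ
          rw [List.length_append] at this
          have hp1 : 0 < (pvTakeSeg (pvCurMex f h).2 (seg + 1) seen ((pvCurMex f h).2).toNat (x :: t)).2.1.length :=
            List.length_pos_iff.mpr hpne
          omega
        -- the removal fold keeps the invariants
        have hdf := pvDropFold maxv
          (pvTakeSeg (pvCurMex f h).2 (seg + 1) seen ((pvCurMex f h).2).toNat (x :: t)).2.1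
          (pvTakeSeg (pvCurMex f h).2 (seg + 1) seen ((pvCurMex f h).2).toNat (x :: t)).2.2
          f (pvCurMex f h).1
          (by intro v h0 h1; rw [happ]; exact hf v h0 h1)
          hm_sort
          (fun v hv => hr v (hm_sub hv))
          (fun v h0 h1 hf0 => hm_keep v (hz v h0 h1 hf0) hf0)
        congr 1
        rw [← hrest]
        apply ih
        · omega
        · omega
        · exact hdf.1
        · exact hdf.2.1
        · exact hdf.2.2.1
        · exact hdf.2.2.2
        · intro v
          rcases hseen' v with hv | hv
          · rw [hv]; exact le_trans (hseen v) (by omega)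
          · omega

-- ===== VERDICT (by name: the statement is the Claim_ definition above) =====
theorem getMaxArray_spec : Claim_equal_getMaxArray := by
  intro a _
  unfold Spec_getMaxArray getMaxArray getMaxArray_alt
  simp only []
  have hfreq := pvFreqInit_spec ((a.length : Int) + 1) a
  have hmiss := pvMissInit_spec (a.length + 1) (pvFreqInit ((a.length : Int) + 1) a)
  apply pvOuter_eq_pvGo
  · exact le_refl _
  · push_cast; omega
  · exact hfreq
  · exact hmiss.1
  · intro v hv; have := hmiss.2.1 v hv; push_cast at this ⊢; omega
  · intro v h0 hle hf0; exact hmiss.2.2 v h0 (by push_cast at hle ⊢; omega) hf0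
  · intro v; exact Nat.le_refl 0
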